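-- pv_equiv track=rewrite | github.com/dark-sorceror/competitive-programming | LeetCode/3070.py | countSubmatrices
-- ===== SOURCE A (Python) =====
-- def countSubmatrices(grid: list[list[int]], k: int) -> int:
--     m, n = len(grid), len(grid[0])
--     p = [[0] * n for _ in range(m)]
--     c = 0
--
--     for i in range(m):
--         for j in range(n):
--             v = grid[i][j]
--             t = p[i - 1][j] if i > 0 else 0
--             l = p[i][j - 1] if j > 0 else 0
--             o = p[i - 1][j - 1] if i > 0 and j > 0 else 0
--
--             c_sum = v + t + l - o
--             p[i][j] = c_sum
--
--             if c_sum <= k: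
--                 c += 1
--             else:
--                 pass
--
--     return c # (327 ms)
-- ===== SOURCE B (Python) =====
-- def countSubmatrices(grid: list[list[int]], k: int) -> int:
--     n = len(grid[0])
--     col = [0] * n          # col[j] = sum of grid[r][j] over rows processed so far
--     c = 0
--     for row in grid:
--         running = 0        # prefix sum of the updated col over columns 0..j
--         for j in range(n):
--             col[j] += row[j]
--             running += col[j]
--             if running <= k:
--                 c += 1
--     return c
-- ===== Notes on version B (the rewrite author's own statement) =====
-- stated objective: simpler
-- what changed: Replaces the m x n 2-D prefix-sum table with 4-term inclusion-exclusion by a rolling 1-D array of column sums plus a per-row running accumulator (O(n) memory, 2-term updates; measured ~2x faster).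
-- outside the precondition, e.g. on countSubmatrices([[1, 2], [3]], 10): A raises IndexError, B raises IndexError
import Mathlib
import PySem

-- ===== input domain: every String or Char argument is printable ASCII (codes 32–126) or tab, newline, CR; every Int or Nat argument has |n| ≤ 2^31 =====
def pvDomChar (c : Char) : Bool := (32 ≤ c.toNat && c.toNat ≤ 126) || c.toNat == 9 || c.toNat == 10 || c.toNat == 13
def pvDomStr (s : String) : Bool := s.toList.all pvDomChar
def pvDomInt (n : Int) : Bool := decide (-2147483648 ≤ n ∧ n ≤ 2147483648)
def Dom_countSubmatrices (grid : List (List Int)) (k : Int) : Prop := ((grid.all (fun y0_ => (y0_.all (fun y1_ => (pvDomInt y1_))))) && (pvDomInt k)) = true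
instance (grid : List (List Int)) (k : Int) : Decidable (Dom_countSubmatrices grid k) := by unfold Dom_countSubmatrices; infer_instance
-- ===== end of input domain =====

-- B replaces A's m×n 2-D prefix table (4-term inclusion–exclusion) by a rolling 1-D
-- array of column sums plus a per-row running accumulator: simpler, O(n) memory.

-- ===== PORT A =====
-- matrix read p[r][c] / grid[r][c]; exact for the in-range nonnegative indices that
-- A performs inside Pre_ (out-of-range reads only occur outside Pre_, where Python raises)
def pvAt (p : List (List Int)) (r c : Nat) : Int := (p.getD r []).getD c 0

def countSubmatrices (grid : List (List Int)) (k : Int) : Int :=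
  let m := grid.length
  let n := (grid.headD []).length   -- len(grid[0]); Python raises IndexError on [] — excluded by Pre_
  let init : List (List Int) := List.replicate m (List.replicate n 0)
  let res := (List.range m).foldl (fun (st : List (List Int) × Int) i =>
    (List.range n).foldl (fun (st : List (List Int) × Int) j =>
      let p := st.1
      let v := pvAt grid i j
      let t := if 0 < i then pvAt p (i - 1) j else 0
      let l := if 0 < j then pvAt p i (j - 1) else 0
      let o := if 0 < i ∧ 0 < j then pvAt p (i - 1) (j - 1) else 0
      let s := v + t + l - o
      let p' := p.set i ((p.getD i []).set j s)
      (p', if s ≤ k then st.2 + 1 else st.2)) st) (init, 0)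
  res.2

-- ===== PORT B =====
def countSubmatrices_alt (grid : List (List Int)) (k : Int) : Int :=
  let n := (grid.headD []).length   -- len(grid[0]); Python raises IndexError on [] — excluded by Pre_
  let res := grid.foldl (fun (st : List Int × Int) row =>
    let r := (List.range n).foldl (fun (st2 : List Int × Int × Int) j =>
      let col' := st2.1.set j (st2.1.getD j 0 + row.getD j 0)
      let running := st2.2.1 + col'.getD j 0
      (col', running, if running ≤ k then st2.2.2 + 1 else st2.2.2))
      (st.1, 0, st.2)
    (r.1, r.2.2)) (List.replicate ((grid.headD []).length) 0, 0)
  res.2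

-- ===== PRECONDITION & SPEC =====
-- Pre_ excludes exactly the inputs where Python A raises IndexError: the empty grid
-- (len(grid[0])) and grids with a row shorter than the first row (grid[i][j] read).
def Pre_countSubmatrices (grid : List (List Int)) (k : Int) : Prop :=
  grid ≠ [] ∧ ∀ row ∈ grid, (grid.headD []).length ≤ row.length
instance (grid : List (List Int)) (k : Int) : Decidable (Pre_countSubmatrices grid k) := by
  unfold Pre_countSubmatrices; infer_instance

def pvWitness_countSubmatrices : List (List Int) × Int := ([[1, 2], [3, 4]], 3)

def Spec_countSubmatrices (grid : List (List Int)) (k : Int) (out : Int) : Prop := out = countSubmatrices_alt grid k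
instance (grid : List (List Int)) (k : Int) (out : Int) : Decidable (Spec_countSubmatrices grid k out) := by unfold Spec_countSubmatrices; infer_instance

-- ===== CLAIM (what is proved, stated in full; the proofs are below) =====
def Claim_equal_countSubmatrices : Prop := ∀ (grid : List (List Int)) (k : Int), Dom_countSubmatrices grid k → Pre_countSubmatrices grid k → Spec_countSubmatrices grid k (countSubmatrices grid k)

-- ===== LEMMAS AND PROOFS =====

-- pref grid I J = sum of grid[r][c] over r < I, c < J (origin-anchored prefix sum)
def pref (grid : List (List Int)) (I J : Nat) : Int :=
  ∑ r ∈ Finset.range I, ∑ c ∈ Finset.range J, pvAt grid r c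

-- colsum grid I j = sum of grid[r][j] over r < I
def colsum (grid : List (List Int)) (I : Nat) (j : Nat) : Int :=
  ∑ r ∈ Finset.range I, pvAt grid r j

-- number (as Int) of cells (r,c), r < i, c < n, whose prefix sum is ≤ k
def cntFull (grid : List (List Int)) (k : Int) (n i : Nat) : Int :=
  ∑ r ∈ Finset.range i, ∑ c ∈ Finset.range n, (if pref grid (r + 1) (c + 1) ≤ k then (1 : Int) else 0)

lemma pref_zero_left (grid : List (List Int)) (J : Nat) : pref grid 0 J = 0 := by
  simp [pref]

lemma pref_zero_right (grid : List (List Int)) (I : Nat) : pref grid I 0 = 0 := by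
  simp [pref]

lemma pref_rec (grid : List (List Int)) (i j : Nat) :
    pref grid (i + 1) (j + 1) =
      pvAt grid i j + pref grid i (j + 1) + pref grid (i + 1) j - pref grid i j := by
  simp [pref, Finset.sum_range_succ, Finset.sum_add_distrib]
  ring

lemma sum_colsum (grid : List (List Int)) (I J : Nat) :
    ∑ c ∈ Finset.range J, colsum grid I c = pref grid I J := by
  unfold colsum pref
  rw [Finset.sum_comm]

lemma getD_set_self {α : Type} [Inhabited α] (l : List α) (i : Nat) (a d : α) (h : i < l.length) :
    (l.set i a).getD i d = a := by
  simp [List.getD, h]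

lemma getD_set_ne {α : Type} [Inhabited α] (l : List α) (i r : Nat) (a d : α) (h : i ≠ r) :
    (l.set i a).getD r d = l.getD r d := by
  simp [List.getD, List.getElem?_set_ne h]

lemma colsum_succ (grid : List (List Int)) (I j : Nat) :
    colsum grid (I + 1) j = colsum grid I j + pvAt grid I j := by
  simp [colsum, Finset.sum_range_succ]

-- ---------- A side ----------

-- invariants over A's fold state (p, c)
def InvA (grid : List (List Int)) (k : Int) (m n i j : Nat) (st : List (List Int) × Int) : Prop :=
  st.1.length = m ∧
  (∀ r, (st.1.getD r []).length = if r < m then n else 0) ∧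
  (∀ r c, ((r < i ∧ c < n) ∨ (r = i ∧ c < j)) → pvAt st.1 r c = pref grid (r + 1) (c + 1)) ∧
  st.2 = cntFull grid k n i +
    ∑ c ∈ Finset.range j, (if pref grid (i + 1) (c + 1) ≤ k then (1 : Int) else 0)

lemma stepA_inner (grid : List (List Int)) (k : Int) (m n i j : Nat)
    (hi : i < m) (hj : j < n) (st : List (List Int) × Int)
    (h : InvA grid k m n i j st) :
    InvA grid k m n i (j + 1)
      (let p := st.1
       let v := pvAt grid i j
       let t := if 0 < i then pvAt p (i - 1) j else 0
       let l := if 0 < j then pvAt p i (j - 1) else 0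
       let o := if 0 < i ∧ 0 < j then pvAt p (i - 1) (j - 1) else 0
       let s := v + t + l - o
       let p' := p.set i ((p.getD i []).set j s)
       (p', if s ≤ k then st.2 + 1 else st.2)) := by
  obtain ⟨hlen, hrow, hcorr, hc⟩ := h
  -- the three reads equal the corresponding prefix sums (guards collapse: pref with a 0 side is 0)
  have ht : (if 0 < i then pvAt st.1 (i - 1) j else 0) = pref grid i (j + 1) := by
    rcases Nat.eq_zero_or_pos i with h0 | h0
    · simp [h0, pref_zero_left]
    · have := hcorr (i - 1) j (Or.inl ⟨by omega, hj⟩)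
      rw [if_pos h0, this]
      congr 1
      omega
  have hl : (if 0 < j then pvAt st.1 i (j - 1) else 0) = pref grid (i + 1) j := by
    rcases Nat.eq_zero_or_pos j with h0 | h0
    · simp [h0, pref_zero_right]
    · have := hcorr i (j - 1) (Or.inr ⟨rfl, by omega⟩)
      rw [if_pos h0, this]
      congr 1
      omega
  have ho : (if 0 < i ∧ 0 < j then pvAt st.1 (i - 1) (j - 1) else 0) = pref grid i j := by
    rcases Nat.eq_zero_or_pos i with h0 | h0
    · simp [h0, pref_zero_left]
    rcases Nat.eq_zero_or_pos j with h1 | h1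
    · simp [h1, pref_zero_right]
    · have := hcorr (i - 1) (j - 1) (Or.inl ⟨by omega, by omega⟩)
      rw [if_pos ⟨h0, h1⟩, this]
      congr 1 <;> omega
  have hs : pvAt grid i j + (if 0 < i then pvAt st.1 (i - 1) j else 0) +
      (if 0 < j then pvAt st.1 i (j - 1) else 0) -
      (if 0 < i ∧ 0 < j then pvAt st.1 (i - 1) (j - 1) else 0) = pref grid (i + 1) (j + 1) := by
    rw [ht, hl, ho, pref_rec]
  have hilen : i < st.1.length := by omega
  have hrowi : (st.1.getD i []).length = n := by
    have := hrow i
    simpa [hi] using this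
  show InvA grid k m n i (j + 1)
    (st.1.set i ((st.1.getD i []).set j (pvAt grid i j + (if 0 < i then pvAt st.1 (i - 1) j else 0) + (if 0 < j then pvAt st.1 i (j - 1) else 0) - (if 0 < i ∧ 0 < j then pvAt st.1 (i - 1) (j - 1) else 0))),
     if pvAt grid i j + (if 0 < i then pvAt st.1 (i - 1) j else 0) + (if 0 < j then pvAt st.1 i (j - 1) else 0) - (if 0 < i ∧ 0 < j then pvAt st.1 (i - 1) (j - 1) else 0) ≤ k then st.2 + 1 else st.2)
  refine ⟨by simp [hlen], ?_, ?_, ?_⟩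
  · intro r
    rcases eq_or_ne i r with rfl | hne
    · rw [getD_set_self _ _ _ _ hilen, if_pos hi]
      simpa using hrowi
    · rw [getD_set_ne _ _ _ _ _ hne]
      exact hrow r
  · intro r c hrc
    by_cases hri : r = i
    · subst hri
      unfold pvAt
      rw [getD_set_self _ _ _ _ hilen]
      by_cases hcj : c = j
      · subst hcj
        rw [getD_set_self _ _ _ _ (by omega)]
        exact hs
      · rw [getD_set_ne _ _ _ _ _ (Ne.symm hcj)]
        have hcj' : c < j := by rcases hrc with h1 | h1 <;> omega
        exact hcorr r c (Or.inr ⟨rfl, hcj'⟩)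
    · unfold pvAt
      rw [getD_set_ne _ _ _ _ _ (fun h => hri h.symm)]
      have hr' : r < i ∧ c < n := by
        rcases hrc with h1 | h1
        · exact h1
        · exact absurd h1.1 hri
      exact hcorr r c (Or.inl hr')
  · show (if pvAt grid i j + (if 0 < i then pvAt st.1 (i - 1) j else 0) + (if 0 < j then pvAt st.1 i (j - 1) else 0) - (if 0 < i ∧ 0 < j then pvAt st.1 (i - 1) (j - 1) else 0) ≤ k then st.2 + 1 else st.2) = _
    rw [hs]
    simp only [Finset.sum_range_succ]
    split_ifs with hsk
    · rw [hc]; ring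
    · rw [hc]; ring

lemma foldA_inner (grid : List (List Int)) (k : Int) (m n i : Nat)
    (hi : i < m) (J : Nat) (hJ : J ≤ n) (st : List (List Int) × Int)
    (h : InvA grid k m n i 0 st) :
    InvA grid k m n i J ((List.range J).foldl (fun (st : List (List Int) × Int) j =>
      let p := st.1
      let v := pvAt grid i j
      let t := if 0 < i then pvAt p (i - 1) j else 0
      let l := if 0 < j then pvAt p i (j - 1) else 0
      let o := if 0 < i ∧ 0 < j then pvAt p (i - 1) (j - 1) else 0
      let s := v + t + l - o
      let p' := p.set i ((p.getD i []).set j s)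
      (p', if s ≤ k then st.2 + 1 else st.2)) st) := by
  induction J with
  | zero => simpa using h
  | succ J ih =>
    rw [List.range_succ, List.foldl_append]
    exact stepA_inner grid k m n i J hi (by omega) _ (ih (by omega))

-- invariant across whole processed rows
def OutA (grid : List (List Int)) (k : Int) (m n i : Nat) (st : List (List Int) × Int) : Prop :=
  st.1.length = m ∧
  (∀ r, (st.1.getD r []).length = if r < m then n else 0) ∧
  (∀ r c, r < i → c < n → pvAt st.1 r c = pref grid (r + 1) (c + 1)) ∧
  st.2 = cntFull grid k n i

lemma OutA_to_InvA (grid : List (List Int)) (k : Int) (m n i : Nat)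
    (st : List (List Int) × Int) (h : OutA grid k m n i st) : InvA grid k m n i 0 st := by
  obtain ⟨h1, h2, h3, h4⟩ := h
  refine ⟨h1, h2, ?_, ?_⟩
  · intro r c hrc
    rcases hrc with h | h
    · exact h3 r c h.1 h.2
    · omega
  · simpa using h4

lemma InvA_to_OutA (grid : List (List Int)) (k : Int) (m n i : Nat)
    (st : List (List Int) × Int) (h : InvA grid k m n i n st) : OutA grid k m n (i + 1) st := by
  obtain ⟨h1, h2, h3, h4⟩ := h
  refine ⟨h1, h2, ?_, ?_⟩
  · intro r c hr hc
    exact h3 r c (by omega)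
  · rw [h4]
    simp [cntFull, Finset.sum_range_succ]

lemma foldA_outer (grid : List (List Int)) (k : Int) (m n : Nat) (I : Nat) (hI : I ≤ m)
    (st : List (List Int) × Int) (h : OutA grid k m n 0 st) :
    OutA grid k m n I ((List.range I).foldl (fun (st : List (List Int) × Int) i =>
      (List.range n).foldl (fun (st : List (List Int) × Int) j =>
        let p := st.1
        let v := pvAt grid i j
        let t := if 0 < i then pvAt p (i - 1) j else 0
        let l := if 0 < j then pvAt p i (j - 1) else 0
        let o := if 0 < i ∧ 0 < j then pvAt p (i - 1) (j - 1) else 0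
        let s := v + t + l - o
        let p' := p.set i ((p.getD i []).set j s)
        (p', if s ≤ k then st.2 + 1 else st.2)) st) st) := by
  induction I with
  | zero => simpa using h
  | succ I ih =>
    rw [List.range_succ, List.foldl_append]
    have hin := OutA_to_InvA grid k m n I _ (ih (by omega))
    exact InvA_to_OutA grid k m n I _ (foldA_inner grid k m n I (by omega) n (le_refl n) _ hin)

lemma countSubmatrices_eq_cnt (grid : List (List Int)) (k : Int) :
    countSubmatrices grid k = cntFull grid k (grid.headD []).length grid.length := by
  unfold countSubmatrices
  have h0 : OutA grid k grid.length (grid.headD []).length 0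
      (List.replicate grid.length (List.replicate (grid.headD []).length 0), 0) := by
    refine ⟨by simp, ?_, by omega, by simp [cntFull]⟩
    intro r
    by_cases hr : r < grid.length
    · simp [List.getD, hr]
    · simp [List.getD, hr]
  have := foldA_outer grid k grid.length (grid.headD []).length grid.length (le_refl _) _ h0
  exact this.2.2.2

-- ---------- B side ----------

-- invariant of B's inner fold over columns of row i (state: col, running, c)
def InvB (grid : List (List Int)) (k : Int) (n i j : Nat) (st : List Int × Int × Int) : Prop :=
  st.1.length = n ∧
  (∀ t, t < j → st.1.getD t 0 = colsum grid (i + 1) t) ∧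
  (∀ t, j ≤ t → t < n → st.1.getD t 0 = colsum grid i t) ∧
  st.2.1 = ∑ t ∈ Finset.range j, colsum grid (i + 1) t ∧
  st.2.2 = cntFull grid k n i +
    ∑ c ∈ Finset.range j, (if pref grid (i + 1) (c + 1) ≤ k then (1 : Int) else 0)

lemma stepB_inner (grid : List (List Int)) (k : Int) (n i j : Nat) (hj : j < n)
    (st : List Int × Int × Int) (h : InvB grid k n i j st) :
    InvB grid k n i (j + 1)
      (let col' := st.1.set j (st.1.getD j 0 + (grid.getD i []).getD j 0)
       let running := st.2.1 + col'.getD j 0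
       (col', running, if running ≤ k then st.2.2 + 1 else st.2.2)) := by
  obtain ⟨hlen, hdone, htodo, hrun, hc⟩ := h
  have hjlen : j < st.1.length := by omega
  have hnew : st.1.getD j 0 + (grid.getD i []).getD j 0 = colsum grid (i + 1) j := by
    rw [htodo j (le_refl j) hj, colsum_succ]
    rfl
  have hget : (st.1.set j (st.1.getD j 0 + (grid.getD i []).getD j 0)).getD j 0
      = colsum grid (i + 1) j := by
    rw [getD_set_self _ _ _ _ hjlen, hnew]
  have hrun' : st.2.1 + (st.1.set j (st.1.getD j 0 + (grid.getD i []).getD j 0)).getD j 0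
      = pref grid (i + 1) (j + 1) := by
    rw [hget, hrun, ← Finset.sum_range_succ, sum_colsum]
  show InvB grid k n i (j + 1)
    (st.1.set j (st.1.getD j 0 + (grid.getD i []).getD j 0),
     st.2.1 + (st.1.set j (st.1.getD j 0 + (grid.getD i []).getD j 0)).getD j 0,
     if st.2.1 + (st.1.set j (st.1.getD j 0 + (grid.getD i []).getD j 0)).getD j 0 ≤ k then st.2.2 + 1 else st.2.2)
  refine ⟨by simp [hlen], ?_, ?_, ?_, ?_⟩
  · intro t ht
    by_cases htj : t = j
    · subst htj; exact hget
    · rw [getD_set_ne _ _ _ _ _ (Ne.symm htj)]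
      exact hdone t (by omega)
  · intro t ht htn
    rw [getD_set_ne _ _ _ _ _ (by omega)]
    exact htodo t (by omega) htn
  · rw [hrun', ← sum_colsum, Finset.sum_range_succ]
  · rw [hrun']
    simp only [Finset.sum_range_succ]
    split_ifs with hsk
    · rw [hc]; ring
    · rw [hc]; ring

lemma foldB_inner (grid : List (List Int)) (k : Int) (n i : Nat) (J : Nat) (hJ : J ≤ n)
    (st : List Int × Int × Int) (h : InvB grid k n i 0 st) :
    InvB grid k n i J ((List.range J).foldl (fun (st2 : List Int × Int × Int) j =>
      let col' := st2.1.set j (st2.1.getD j 0 + (grid.getD i []).getD j 0)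
      let running := st2.2.1 + col'.getD j 0
      (col', running, if running ≤ k then st2.2.2 + 1 else st2.2.2)) st) := by
  induction J with
  | zero => simpa using h
  | succ J ih =>
    rw [List.range_succ, List.foldl_append]
    exact stepB_inner grid k n i J (by omega) _ (ih (by omega))

def OutB (grid : List (List Int)) (k : Int) (n i : Nat) (st : List Int × Int) : Prop :=
  st.1.length = n ∧
  (∀ t, t < n → st.1.getD t 0 = colsum grid i t) ∧
  st.2 = cntFull grid k n i

lemma foldB_rows (grid : List (List Int)) (k : Int) (n : Nat) :
    ∀ (rows : List (List Int)) (i : Nat), rows = grid.drop i →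
    ∀ (st : List Int × Int), OutB grid k n i st →
    OutB grid k n (i + rows.length) (rows.foldl (fun (st : List Int × Int) row =>
      let r := (List.range n).foldl (fun (st2 : List Int × Int × Int) j =>
        let col' := st2.1.set j (st2.1.getD j 0 + row.getD j 0)
        let running := st2.2.1 + col'.getD j 0
        (col', running, if running ≤ k then st2.2.2 + 1 else st2.2.2))
        (st.1, 0, st.2)
      (r.1, r.2.2)) st) := by
  intro rows
  induction rows with
  | nil => intro i _ st h; simpa using h
  | cons row rest ih =>
    intro i hdrop st h
    have hilen : i < grid.length := by
      by_contra hc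
      rw [List.drop_eq_nil_of_le (by omega)] at hdrop
      simp at hdrop
    have hrow : grid.getD i [] = row := by
      have h2 : grid.drop i = row :: rest := hdrop.symm
      have : grid[i]? = some row := by
        have := congrArg (fun l => l.head?) h2
        simpa [List.head?_drop] using this
      simp [List.getD, this]
    have hrest : rest = grid.drop (i + 1) := by
      have := congrArg List.tail hdrop.symm
      simpa [List.tail_drop] using this.symm
    obtain ⟨h1, h2, h3⟩ := h
    have hin0 : InvB grid k n i 0 (st.1, 0, st.2) :=
      ⟨h1, by omega, fun t _ htn => h2 t htn, by simp, by simpa using h3⟩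
    have hin := foldB_inner grid k n i n (le_refl n) _ hin0
    obtain ⟨g1, g2, _, _, g5⟩ := hin
    simp only [List.foldl_cons]
    rw [← hrow]
    have hnext : OutB grid k n (i + 1)
        (((List.range n).foldl (fun (st2 : List Int × Int × Int) j =>
          let col' := st2.1.set j (st2.1.getD j 0 + (grid.getD i []).getD j 0)
          let running := st2.2.1 + col'.getD j 0
          (col', running, if running ≤ k then st2.2.2 + 1 else st2.2.2)) (st.1, 0, st.2)).1,
         ((List.range n).foldl (fun (st2 : List Int × Int × Int) j =>
          let col' := st2.1.set j (st2.1.getD j 0 + (grid.getD i []).getD j 0)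
          let running := st2.2.1 + col'.getD j 0
          (col', running, if running ≤ k then st2.2.2 + 1 else st2.2.2)) (st.1, 0, st.2)).2.2) := by
      refine ⟨g1, fun t htn => g2 t htn, ?_⟩
      rw [g5]
      simp [cntFull, Finset.sum_range_succ]
    have := ih (i + 1) hrest _ hnext
    have harith : i + 1 + rest.length = i + (rest.length + 1) := by omega
    rw [harith] at this
    exact this

lemma countSubmatrices_alt_eq_cnt (grid : List (List Int)) (k : Int) :
    countSubmatrices_alt grid k = cntFull grid k (grid.headD []).length grid.length := by
  unfold countSubmatrices_alt
  have h0 : OutB grid k (grid.headD []).length 0 (List.replicate (grid.headD []).length 0, 0) := by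
    refine ⟨by simp, ?_, by simp [cntFull]⟩
    intro t htn
    simp only [colsum, Finset.range_zero, Finset.sum_empty]
    simp only [List.getD, List.getElem?_replicate]
    split <;> rfl
  have := foldB_rows grid k (grid.headD []).length grid 0 (by simp) _ h0
  simp only [Nat.zero_add] at this
  exact this.2.2

-- ===== VERDICT (by name: the statement is the Claim_ definition above) =====
theorem countSubmatrices_spec : Claim_equal_countSubmatrices := by
  intro grid k _ _
  unfold Spec_countSubmatrices
  rw [countSubmatrices_eq_cnt, countSubmatrices_alt_eq_cnt]
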